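-- pv_equiv track=rewrite | github.com/ronanchris/professional-markdown-toolkit-v2 | markdown-toolkit/tools/notion_import_fixer.py | split_large_document
-- ===== SOURCE A (Python) =====
-- def split_large_document(text, max_lines=1500):
--     """
--     Split very large documents into smaller chunks for Notion.
--     """
--     lines = text.split('\n')
--
--     if len(lines) <= max_lines:
--         return [text]  # No splitting needed
--
--     chunks = []
--     current_chunk = []
--     current_lines = 0
--
--     for line in lines:
--         # Check if we should start a new chunk
--         if (current_lines >= max_lines and
--             (line.startswith('#') or line.strip() == '' or line.startswith('---'))):
--
--             # Save current chunk
--             if current_chunk: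
--                 chunks.append('\n'.join(current_chunk))
--                 current_chunk = []
--                 current_lines = 0
--
--         current_chunk.append(line)
--         current_lines += 1
--
--     # Add the last chunk
--     if current_chunk:
--         chunks.append('\n'.join(current_chunk))
--
--     return chunks
-- ===== SOURCE B (Python) =====
-- def _is_break(line):
--     return line.startswith('#') or line.strip() == '' or line.startswith('---')
--
--
-- def split_large_document(text, max_lines=1500):
--     """
--     Split very large documents into smaller chunks for Notion.
--     Two-pass version: first compute boundary indices, then slice.
--     """
--     lines = text.split('\n')
--
--     if len(lines) <= max_lines:
--         return [text]  # No splitting needed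
--
--     boundaries = []
--     start = 0
--     for i, line in enumerate(lines):
--         if i - start >= max_lines and i > start and _is_break(line):
--             boundaries.append(i)
--             start = i
--     boundaries.append(len(lines))
--
--     chunks = []
--     prev = 0
--     for b in boundaries:
--         chunks.append('\n'.join(lines[prev:b]))
--         prev = b
--     return chunks
-- ===== Notes on version B (the rewrite author's own statement) =====
-- stated objective: alternative
-- what changed: Replaced the single accumulate-and-flush loop (building each chunk line by line in a mutable current_chunk) by a two-pass scheme: one pass records boundary indices where a new chunk starts, a second pass slices and joins the line list at those boundaries.
import Mathlib
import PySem

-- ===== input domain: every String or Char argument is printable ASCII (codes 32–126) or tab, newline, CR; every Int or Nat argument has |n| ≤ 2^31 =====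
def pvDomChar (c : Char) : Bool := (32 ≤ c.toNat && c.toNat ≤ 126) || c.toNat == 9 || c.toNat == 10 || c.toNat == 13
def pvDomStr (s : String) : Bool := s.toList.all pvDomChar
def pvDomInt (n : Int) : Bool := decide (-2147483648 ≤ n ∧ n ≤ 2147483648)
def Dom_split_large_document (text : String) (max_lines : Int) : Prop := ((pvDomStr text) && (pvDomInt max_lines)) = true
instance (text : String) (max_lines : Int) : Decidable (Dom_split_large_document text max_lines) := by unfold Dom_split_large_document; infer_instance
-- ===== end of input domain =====

-- B replaces A's accumulate-and-flush loop by a two-pass scheme (boundary indices, then slicing);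
-- same cost, alternative decomposition; equivalence proved on all inputs.

-- ===== PORT A =====
-- A's single loop: carries (chunks, current_chunk, current_lines), flushing current_chunk
-- when the line count reached max_lines and the line is a heading/blank/separator.
def pvALoop (ml : Int) : List String → List String → List String → Int → List String
  | [], chunks, cur, _curLines =>
      -- Add the last chunk
      if cur = [] then chunks else chunks ++ [PySem.Str.join "\n" cur]
  | line :: rest, chunks, cur, curLines =>
      if curLines ≥ ml ∧ (PySem.Str.startswith line "#" || PySem.Str.strip line == ""
            || PySem.Str.startswith line "---") = true then
        if cur = [] then pvALoop ml rest chunks (cur ++ [line]) (curLines + 1)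
        else pvALoop ml rest (chunks ++ [PySem.Str.join "\n" cur]) ([] ++ [line]) (0 + 1)
      else pvALoop ml rest chunks (cur ++ [line]) (curLines + 1)

def split_large_document (text : String) (max_lines : Int) : List String :=
  let lines := (PySem.Str.split? text "\n").getD []   -- sep ≠ "", so split? is always `some`
  if (lines.length : Int) ≤ max_lines then [text]
  else pvALoop max_lines lines [] [] 0

-- ===== PORT B =====
def pvIsBreak (line : String) : Bool :=
  PySem.Str.startswith line "#" || PySem.Str.strip line == "" || PySem.Str.startswith line "---"

-- first pass of B: boundary indices (i, start carried as Python ints)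
def pvBBounds (ml : Int) : Int → Int → List String → List Int
  | _i, _start, [] => []
  | i, start, line :: rest =>
      if i - start ≥ ml ∧ i > start ∧ pvIsBreak line = true then
        i :: pvBBounds ml (i + 1) i rest
      else pvBBounds ml (i + 1) start rest

-- second pass of B: slice lines at the boundaries and join
def pvBChunks (lines : List String) : Int → List Int → List String
  | _prev, [] => []
  | prev, b :: rest =>
      PySem.Str.join "\n" (PySem.List.slice lines (some prev) (some b)) :: pvBChunks lines b rest

def split_large_document_alt (text : String) (max_lines : Int) : List String :=
  let lines := (PySem.Str.split? text "\n").getD []   -- sep ≠ "", so split? is always `some`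
  if (lines.length : Int) ≤ max_lines then [text]
  else pvBChunks lines 0 (pvBBounds max_lines 0 0 lines ++ [(lines.length : Int)])

-- ===== PRECONDITION & SPEC =====
def Spec_split_large_document (text : String) (max_lines : Int) (out : List String) : Prop := out = split_large_document_alt text max_lines
instance (text : String) (max_lines : Int) (out : List String) : Decidable (Spec_split_large_document text max_lines out) := by unfold Spec_split_large_document; infer_instance

-- ===== CLAIM (what is proved, stated in full; the proofs are below) =====
def Claim_equal_split_large_document : Prop := ∀ (text : String) (max_lines : Int), Dom_split_large_document text max_lines → Spec_split_large_document text max_lines (split_large_document text max_lines)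

-- ===== LEMMAS AND PROOFS =====

lemma pvGoNeNil (sep : List Char) : ∀ (fuel : Nat) (l cur : List Char) (acc : List (List Char)),
    PySem.Chars.splitOn.go sep fuel l cur acc ≠ [] := by
  intro fuel
  induction fuel with
  | zero => intro l cur acc; simp [PySem.Chars.splitOn.go]
  | succ n ih =>
    intro l cur acc
    cases l with
    | nil => simp [PySem.Chars.splitOn.go]
    | cons c rest =>
      rw [PySem.Chars.splitOn.go]
      split
      · exact ih _ _ _
      · exact ih _ _ _

lemma pvLinesNeNil (text : String) : (PySem.Str.split? text "\n").getD [] ≠ [] := by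
  simp [PySem.Str.split?, PySem.Chars.split?, PySem.Chars.splitOn]
  exact pvGoNeNil _ _ _ _ _

-- main invariant: A's loop from state (chunks, lines[start:i], i-start) over lines[i:]
-- equals chunks ++ B's second pass over the boundaries B's first pass still finds.
lemma pvLoopEq (ml : Int) (lines : List String) :
    ∀ (rest chunks : List String) (iN sN : Nat),
      sN ≤ iN → iN ≤ lines.length → lines.drop iN = rest → (rest = [] → sN < iN) →
      pvALoop ml rest chunks ((lines.drop sN).take (iN - sN)) ((iN : Int) - (sN : Int)) =
        chunks ++ pvBChunks lines (sN : Int)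
          (pvBBounds ml (iN : Int) (sN : Int) rest ++ [(lines.length : Int)]) := by
  intro rest
  induction rest with
  | nil =>
    intro chunks iN sN hsi hi hdrop hne
    have hlen : iN = lines.length := by
      have := List.drop_eq_nil_iff.mp hdrop
      omega
    have hs : sN < lines.length := by have := hne rfl; omega
    have hcur : (lines.drop sN).take (iN - sN) = lines.drop sN := by
      apply List.take_of_length_le
      simp [List.length_drop]; omega
    have hcne : lines.drop sN ≠ [] := by
      simp; omega
    rw [pvALoop, hcur, if_neg hcne, pvBBounds]
    rw [List.nil_append, pvBChunks, pvBChunks]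
    congr 2
    rw [PySem.List.slice_natCast, List.take_of_length_le (by simp [List.length_drop])]
  | cons line rest' ih =>
    intro chunks iN sN hsi hi hdrop hne
    have hilt : iN < lines.length := by
      by_contra h
      have : lines.drop iN = [] := List.drop_eq_nil_iff.mpr (by omega)
      rw [this] at hdrop; exact (List.cons_ne_nil _ _) hdrop.symm
    have hline : lines[iN] = line := by
      have h0 : (List.drop iN lines)[0]'(by rw [hdrop]; simp) = line := by simp [hdrop]
      simpa using h0
    have hdrop' : lines.drop (iN + 1) = rest' := by
      have ht : (lines.drop iN).tail = lines.drop (iN + 1) := by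
        rw [List.tail_drop]
      rw [hdrop] at ht; simpa using ht.symm
    have hcurlen : ((lines.drop sN).take (iN - sN)).length = iN - sN := by
      simp [List.length_take, List.length_drop]; omega
    -- appending the current line extends the taken prefix by one
    have happ : (lines.drop sN).take (iN - sN) ++ [line] = (lines.drop sN).take (iN + 1 - sN) := by
      rw [show iN + 1 - sN = (iN - sN) + 1 from by omega, List.take_add_one]
      congr 1
      have hx : (List.drop sN lines)[iN - sN]? = some line := by
        rw [List.getElem?_drop, show sN + (iN - sN) = iN from by omega,
          List.getElem?_eq_getElem hilt, hline]
      rw [hx]; rfl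
    have hAcond : ((iN : Int) - (sN : Int) ≥ ml ∧
        (PySem.Str.startswith line "#" || PySem.Str.strip line == ""
          || PySem.Str.startswith line "---") = true) ↔
        ((iN : Int) - (sN : Int) ≥ ml ∧ pvIsBreak line = true) := by
      unfold pvIsBreak; tauto
    by_cases hCB : (iN : Int) - (sN : Int) ≥ ml ∧ (iN : Int) > (sN : Int) ∧ pvIsBreak line = true
    · -- boundary: A flushes, B records i
      obtain ⟨h1, h2, h3⟩ := hCB
      have hsiN : sN < iN := by exact_mod_cast h2
      have hcne : (lines.drop sN).take (iN - sN) ≠ [] := by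
        rw [← List.length_pos_iff, hcurlen]; omega
      rw [pvALoop, if_pos (hAcond.mpr ⟨h1, h3⟩), if_neg hcne]
      rw [pvBBounds, if_pos ⟨h1, h2, h3⟩, List.cons_append, pvBChunks]
      have hIH := ih (chunks ++ [PySem.Str.join "\n" ((lines.drop sN).take (iN - sN))])
        (iN + 1) iN (by omega) (by omega) hdrop' (by intro _; omega)
      have hc1 : (lines.drop iN).take (iN + 1 - iN) = [] ++ [line] := by
        rw [hdrop]; simp
      have hc2 : ((iN : Int) + 1) - (iN : Int) = 0 + 1 := by ring
      rw [hc1, Nat.cast_add, Nat.cast_one, hc2] at hIH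
      rw [hIH, List.append_assoc, List.singleton_append]
      congr 2
      rw [PySem.List.slice_natCast]
    · -- no boundary for B; A either skips the flush test or finds current_chunk empty
      have hAstep : pvALoop ml (line :: rest') chunks ((lines.drop sN).take (iN - sN))
          ((iN : Int) - (sN : Int)) =
          pvALoop ml rest' chunks ((lines.drop sN).take (iN - sN) ++ [line])
            ((iN : Int) - (sN : Int) + 1) := by
        rw [pvALoop]
        split
        · next hA =>
          have hA' := hAcond.mp hA
          have hiseq : iN = sN := by
            by_contra h
            exact hCB ⟨hA'.1, by exact_mod_cast Nat.lt_of_le_of_ne hsi (Ne.symm h), hA'.2⟩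
          have hcnil : (lines.drop sN).take (iN - sN) = [] := by
            rw [← List.length_eq_zero_iff, hcurlen]; omega
          rw [if_pos hcnil]
        · rfl
      rw [hAstep, happ]
      have hIH := ih chunks (iN + 1) sN (by omega) (by omega) hdrop' (by intro _; omega)
      rw [Nat.cast_add, Nat.cast_one,
        show (iN : Int) + 1 - (sN : Int) = (iN : Int) - (sN : Int) + 1 from by ring] at hIH
      rw [hIH, pvBBounds, if_neg hCB]

-- ===== VERDICT (by name: the statement is the Claim_ definition above) =====
theorem split_large_document_spec : Claim_equal_split_large_document := by
  intro text max_lines _hdom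
  unfold Spec_split_large_document split_large_document split_large_document_alt
  set lines := (PySem.Str.split? text "\n").getD [] with hlines
  by_cases hle : (lines.length : Int) ≤ max_lines
  · rw [if_pos hle, if_pos hle]
  · rw [if_neg hle, if_neg hle]
    have hne : lines ≠ [] := pvLinesNeNil text
    have := pvLoopEq max_lines lines lines [] 0 0 (le_refl _) (by omega) (by simp)
      (by intro h; exact absurd h hne)
    simpa using this
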